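-- pv_equiv track=rewrite | github.com/BengalToyger/receive_sys | receive_sys.py | map_ps_bits
-- ===== SOURCE A (Python) =====
-- PS_BIT_MAP = [2,6,3,4,0,1]
--
-- PS_REF_BIT = 5
--
-- def map_ps_bits(ps_1, ps_2, ps_3, ps_4):
--     ps_1_fix = 0
--     ps_2_fix = 0
--     ps_3_fix = 0
--     ps_4_fix = 0
--
--     # Iterating through the bit map, set the correct bits for each phase shifter
--     for i in range(6):
--         ps_1_fix = ps_1_fix|((((1 << i) & (ps_1) and 1)\
--                 <<PS_BIT_MAP[i])&(1<<PS_BIT_MAP[i]))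
--         ps_2_fix = ps_2_fix|((((1 << i) & (ps_2) and 1)\
--                 <<PS_BIT_MAP[i])&(1<<PS_BIT_MAP[i]))
--         ps_3_fix = ps_3_fix|((((1 << i) & (ps_3) and 1)\
--                 <<PS_BIT_MAP[i])&(1<<PS_BIT_MAP[i]))
--         ps_4_fix = ps_4_fix|((((1 << i) & (ps_4) and 1)\
--                 <<PS_BIT_MAP[i])&(1<<PS_BIT_MAP[i]))
--
--     ps_1_fix = ps_1_fix|(1<<PS_REF_BIT)
--     ps_2_fix = ps_2_fix|(1<<PS_REF_BIT)
--     ps_3_fix = ps_3_fix|(1<<PS_REF_BIT)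
--     ps_4_fix = ps_4_fix|(1<<PS_REF_BIT)
--
--     return [ps_1_fix, ps_2_fix, ps_3_fix, ps_4_fix]
-- ===== SOURCE B (Python) =====
-- PS_BIT_MAP = [2,6,3,4,0,1]
--
-- PS_REF_BIT = 5
--
-- # 64-entry lookup table: entry n is n's low 6 bits permuted through PS_BIT_MAP,
-- # with the reference bit OR'd in.
-- _LUT = [(1 << PS_REF_BIT) | sum(((n >> i) & 1) << PS_BIT_MAP[i] for i in range(6))
--         for n in range(64)]
--
-- def map_ps_bits(ps_1, ps_2, ps_3, ps_4):
--     return [_LUT[ps_1 & 63], _LUT[ps_2 & 63], _LUT[ps_3 & 63], _LUT[ps_4 & 63]]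
-- ===== Notes on version B (the rewrite author's own statement) =====
-- stated objective: idiomatic
-- what changed: Replaces the per-bit loop that rebuilds the permuted value for each of the four inputs with a module-level 64-entry lookup table (reference bit pre-OR'd in) indexed by each input's low 6 bits.
import Mathlib
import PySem

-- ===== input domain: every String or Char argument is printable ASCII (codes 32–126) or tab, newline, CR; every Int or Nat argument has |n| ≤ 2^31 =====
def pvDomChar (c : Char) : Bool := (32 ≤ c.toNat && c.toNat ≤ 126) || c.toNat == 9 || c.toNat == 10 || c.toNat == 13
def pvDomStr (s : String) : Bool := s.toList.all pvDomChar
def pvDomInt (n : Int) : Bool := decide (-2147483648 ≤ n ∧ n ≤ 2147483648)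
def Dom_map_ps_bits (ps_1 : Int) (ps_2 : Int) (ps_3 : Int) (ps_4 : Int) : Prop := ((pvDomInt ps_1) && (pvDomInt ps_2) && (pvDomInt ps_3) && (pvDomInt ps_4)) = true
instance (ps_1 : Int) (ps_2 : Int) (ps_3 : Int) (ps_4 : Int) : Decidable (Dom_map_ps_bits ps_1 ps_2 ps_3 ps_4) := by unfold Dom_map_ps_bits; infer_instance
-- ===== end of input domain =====

-- B replaces A's per-bit permutation loop by a 64-entry lookup table indexed by the
-- low 6 bits of each input (alternative/idiomatic; same result for every input).

-- ===== PORT A =====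
def psBitMap : List Int := [2, 6, 3, 4, 0, 1]

def psRefBit : Int := 5

-- one line of A's loop body (the four assignment lines are identical up to the variable)
def psStep (ps : Int) (fix : Int) (i : Int) : Int :=
  PySem.Int.bor fix
    (PySem.Int.band
      ((if PySem.Int.band ((1 : Int) <<< i.toNat) ps = 0 then (0 : Int) else 1) <<<
        (PySem.List.pyGetD psBitMap i 0).toNat)
      ((1 : Int) <<< (PySem.List.pyGetD psBitMap i 0).toNat))

def map_ps_bits (ps_1 : Int) (ps_2 : Int) (ps_3 : Int) (ps_4 : Int) : List Int :=
  let st := (PySem.List.pyRange 0 6 1).foldl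
    (fun (s : Int × Int × Int × Int) i =>
      (psStep ps_1 s.1 i, psStep ps_2 s.2.1 i, psStep ps_3 s.2.2.1 i, psStep ps_4 s.2.2.2 i))
    ((0 : Int), (0 : Int), (0 : Int), (0 : Int))
  [PySem.Int.bor st.1 ((1 : Int) <<< psRefBit.toNat),
   PySem.Int.bor st.2.1 ((1 : Int) <<< psRefBit.toNat),
   PySem.Int.bor st.2.2.1 ((1 : Int) <<< psRefBit.toNat),
   PySem.Int.bor st.2.2.2 ((1 : Int) <<< psRefBit.toNat)]

-- ===== PORT B =====
def psLUT : List Int :=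
  (List.range 64).map (fun n =>
    PySem.Int.bor ((1 : Int) <<< psRefBit.toNat)
      (((List.range 6).map (fun i =>
          (PySem.Int.band (((n : Int)) >>> i) 1) <<<
            (PySem.List.pyGetD psBitMap (i : Int) 0).toNat)).sum))

def psLook (ps : Int) : Int := PySem.List.pyGetD psLUT (PySem.Int.band ps 63) 0

def map_ps_bits_alt (ps_1 : Int) (ps_2 : Int) (ps_3 : Int) (ps_4 : Int) : List Int :=
  [psLook ps_1, psLook ps_2, psLook ps_3, psLook ps_4]

-- ===== PRECONDITION & SPEC =====
def Spec_map_ps_bits (ps_1 : Int) (ps_2 : Int) (ps_3 : Int) (ps_4 : Int) (out : List Int) : Prop := out = map_ps_bits_alt ps_1 ps_2 ps_3 ps_4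
instance (ps_1 : Int) (ps_2 : Int) (ps_3 : Int) (ps_4 : Int) (out : List Int) : Decidable (Spec_map_ps_bits ps_1 ps_2 ps_3 ps_4 out) := by unfold Spec_map_ps_bits; infer_instance

-- ===== CLAIM (what is proved, stated in full; the proofs are below) =====
def Claim_equal_map_ps_bits : Prop := ∀ (ps_1 : Int) (ps_2 : Int) (ps_3 : Int) (ps_4 : Int), Dom_map_ps_bits ps_1 ps_2 ps_3 ps_4 → Spec_map_ps_bits ps_1 ps_2 ps_3 ps_4 (map_ps_bits ps_1 ps_2 ps_3 ps_4)

-- ===== LEMMAS AND PROOFS =====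

-- A's accumulator for a single phase shifter
def fixA (ps : Int) : Int := (PySem.List.pyRange 0 6 1).foldl (psStep ps) 0

lemma mapA_eq (a b c d : Int) : map_ps_bits a b c d =
    [PySem.Int.bor (fixA a) 32, PySem.Int.bor (fixA b) 32,
     PySem.Int.bor (fixA c) 32, PySem.Int.bor (fixA d) 32] := by
  unfold map_ps_bits
  rfl

-- finite core of the masking argument, checked by computation
lemma nat_mask_core : ∀ k : Fin 6, ∀ r : Fin 64,
    (2 ^ (k : Nat) - 2 ^ (k : Nat) * ((r : Nat).testBit k).toNat)
      = 2 ^ (k : Nat) * ((63 - (r : Nat)).testBit k).toNat := by decide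

lemma one_shl (k : Nat) : (1 : Int) <<< k = ((2 ^ k : Nat) : Int) := by
  rw [Int.shiftLeft_eq]; push_cast; ring

lemma negSucc_flip (m : Nat) : (-Int.negSucc m - 1) = (m : Int) := by
  simp [Int.negSucc_eq]

-- the bit test A performs sees only the low 6 bits: (1 << k) & ps = (1 << k) & (ps & 63)
lemma band_pow_mask (k : Nat) (hk : k < 6) (ps : Int) :
    PySem.Int.band ((1 : Int) <<< k) ps
      = PySem.Int.band ((1 : Int) <<< k) (PySem.Int.band ps 63) := by
  rw [one_shl]
  have hmod : ∀ j : Nat, 63 &&& j = j % 64 := by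
    intro j
    rw [Nat.land_comm]
    have := Nat.and_two_pow_sub_one_eq_mod j 6
    norm_num at this ⊢
    exact this
  cases ps with
  | ofNat n =>
    have h63 : (63 : Int) = ((63 : Nat) : Int) := rfl
    rw [Int.ofNat_eq_natCast, h63, PySem.Int.band_natCast, PySem.Int.band_natCast,
      PySem.Int.band_natCast]
    congr 1
    rw [Nat.land_comm n 63, hmod, Nat.two_pow_and, Nat.two_pow_and]
    have ht := Nat.testBit_mod_two_pow n 6 k
    norm_num at ht
    rw [ht]
    simp [hk]
  | negSucc m =>
    have h1 : PySem.Int.band ((2 ^ k : Nat) : Int) (Int.negSucc m)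
        = ((2 ^ k - (2 ^ k &&& m) : Nat) : Int) := by
      simp only [PySem.Int.band]
      rw [if_pos (by positivity), if_neg (by omega), negSucc_flip, Int.toNat_natCast,
        Int.toNat_natCast]
    have h2 : PySem.Int.band (Int.negSucc m) 63 = ((63 - (63 &&& m) : Nat) : Int) := by
      simp only [PySem.Int.band]
      rw [if_neg (by omega), if_pos (by norm_num), negSucc_flip, Int.toNat_natCast,
        show Int.toNat 63 = 63 from rfl]
    rw [h1, h2, PySem.Int.band_natCast]
    congr 1
    rw [hmod, Nat.two_pow_and, Nat.two_pow_and]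
    have ht := Nat.testBit_mod_two_pow m 6 k
    norm_num at ht
    rw [show m.testBit k = (m % 64).testBit k by rw [ht]; simp [hk]]
    have := nat_mask_core ⟨k, hk⟩ ⟨m % 64, Nat.mod_lt m (by norm_num)⟩
    simpa using this

-- ps & 63 is a natural number below 64
lemma band63_repr (ps : Int) : ∃ r : Nat, r < 64 ∧ PySem.Int.band ps 63 = (r : Int) := by
  cases ps with
  | ofNat n =>
    refine ⟨n &&& 63, ?_, ?_⟩
    · have : n &&& 63 ≤ 63 := Nat.and_le_right
      omega
    · rw [Int.ofNat_eq_natCast, show (63 : Int) = ((63 : Nat) : Int) from rfl,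
        PySem.Int.band_natCast]
  | negSucc m =>
    refine ⟨63 - (63 &&& m), by omega, ?_⟩
    simp only [PySem.Int.band]
    rw [if_neg (by omega), if_pos (by norm_num), negSucc_flip, Int.toNat_natCast,
      show Int.toNat 63 = 63 from rfl]

lemma psStep_mask (ps f i : Int) (h0 : 0 ≤ i) (h6 : i < 6) :
    psStep ps f i = psStep (PySem.Int.band ps 63) f i := by
  unfold psStep
  rw [band_pow_mask i.toNat (by omega) ps]

lemma fixA_mask (ps : Int) : fixA ps = fixA (PySem.Int.band ps 63) := by
  unfold fixA
  refine PySem.List.foldl_congr_mem _ _ _ _ ?_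
  intro acc x hx
  rw [PySem.List.mem_pyRange_one] at hx
  exact psStep_mask ps acc x hx.1 hx.2

-- the 64 residues, checked by computation
lemma point_fin : ∀ r : Fin 64,
    PySem.Int.bor (fixA ((r : Nat) : Int)) 32
      = PySem.List.pyGetD psLUT ((r : Nat) : Int) 0 := by decide

lemma point (ps : Int) : PySem.Int.bor (fixA ps) 32 = psLook ps := by
  obtain ⟨r, hr, he⟩ := band63_repr ps
  unfold psLook
  rw [fixA_mask ps, he]
  exact point_fin ⟨r, hr⟩

-- ===== VERDICT (by name: the statement is the Claim_ definition above) =====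
theorem map_ps_bits_spec : Claim_equal_map_ps_bits := by
  intro a b c d _
  unfold Spec_map_ps_bits map_ps_bits_alt
  rw [mapA_eq, point a, point b, point c, point d]
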